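-- pv_equiv track=rewrite | github.com/153957/advent_of_code | aoc2022/day5.py | part1
-- ===== SOURCE A (Python) =====
-- from collections import deque
--
-- def part1(crates_and_moves):
--     crates = crates_and_moves[:crates_and_moves.index('')]
--     moves = crates_and_moves[crates_and_moves.index('') + 1:]
--     stacks = [deque() for _ in crates[-1].split('   ')]
--
--     for column, stack in enumerate(stacks):
--         column_index = 1 + column * 4
--         for crate_row in crates[:-1]:
--             if len(crate_row) > column_index and crate_row[column_index].strip():
--                 stack.appendleft(crate_row[column_index])
--
--     for move in moves:
--         _, amount, _, origin, _, destination = move.split(' ')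
--         for _ in range(int(amount)):
--             stacks[int(destination) - 1].append(stacks[int(origin) - 1].pop())
--
--     return ''.join(stack.pop() for stack in stacks)
-- ===== SOURCE B (Python) =====
-- def part1(crates_and_moves):
--     sep = crates_and_moves.index('')
--     header = crates_and_moves[:sep]
--     n = len(header[-1].split('   '))
--     stacks = [[] for _ in range(n)]
--     # one pass over the crate rows, bottom-to-top, building each stack bottom-up
--     for row in reversed(header[:-1]):
--         for j in range(n):
--             idx = 1 + 4 * j
--             if len(row) > idx and row[idx].strip():
--                 stacks[j].append(row[idx])
--     for move in crates_and_moves[sep + 1:]: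
--         fields = move.split(' ')
--         amount = int(fields[1])
--         if amount > 0:
--             src = stacks[int(fields[3]) - 1]
--             dst = stacks[int(fields[5]) - 1]
--             if src is not dst:
--                 # moving one at a time == moving the whole block reversed
--                 dst.extend(reversed(src[-amount:]))
--                 del src[-amount:]
--     return ''.join(s[-1] for s in stacks)
-- ===== Notes on version B (the rewrite author's own statement) =====
-- stated objective: alternative
-- what changed: Parsing is one bottom-up pass over the crate rows building plain lists (instead of A's per-column rescans of all rows into deques), and each move transfers its whole block at once with a reversed-slice splice guarded by object identity (instead of A's per-crate pop/append loop).
import Mathlib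
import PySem

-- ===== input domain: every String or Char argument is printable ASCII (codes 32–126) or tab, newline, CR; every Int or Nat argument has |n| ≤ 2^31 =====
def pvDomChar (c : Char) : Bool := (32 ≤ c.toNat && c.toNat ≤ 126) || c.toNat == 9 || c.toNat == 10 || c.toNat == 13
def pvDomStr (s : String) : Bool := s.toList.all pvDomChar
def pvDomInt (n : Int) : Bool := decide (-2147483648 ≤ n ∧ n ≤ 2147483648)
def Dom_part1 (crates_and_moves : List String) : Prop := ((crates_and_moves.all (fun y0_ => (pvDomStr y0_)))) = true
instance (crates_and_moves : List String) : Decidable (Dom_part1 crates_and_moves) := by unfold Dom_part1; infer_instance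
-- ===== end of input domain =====

-- B re-implements part1 with a one-pass bottom-up row parse into plain lists and a whole-block
-- reversed-slice splice per move (guarded by stack identity); equal return value on Pre_.
-- Neither program mutates its argument.

-- shared helpers (both Pythons contain these identical expressions)
-- crateAt idx row = row[idx] if len(row) > idx and row[idx].strip() else None
def crateAt (idx : Nat) (row : String) : Option Char :=
  match row.toList[idx]? with
  | some c => if PySem.Chars.strip [c] = [] then none else some c
  | none => none

-- Python list indexing 'lst[i]' for a list of length n: the effective non-negative position
-- (negative i counts from the end); none = IndexError.  Both Pythons index stacks this way.
def pyNorm (n : Nat) (i : Int) : Option Nat :=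
  if 0 ≤ i ∧ i < (n : Int) then some i.toNat
  else if -(n : Int) ≤ i ∧ i < 0 then some (i + n).toNat
  else none

-- ===== PORT A =====
-- one iteration of A's inner loop: stacks[int(destination)-1].append(stacks[int(origin)-1].pop())
-- (int() is re-evaluated inside the loop, as in the Python; parse/index/pop failures raise there,
-- outside Pre_ — the port returns the state unchanged)
def popPushS (s : List (List Char)) (oS dS : String) : List (List Char) :=
  match PySem.Int.ofStr? dS, PySem.Int.ofStr? oS with
  | some d, some o =>
    match pyNorm s.length (d - 1), pyNorm s.length (o - 1) with
    | some di, some oi =>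
      match (s.getD oi []).getLast? with
      | some c => (s.set oi (s.getD oi []).dropLast).modify di (· ++ [c])
      | none => s
    | _, _ => s
  | _, _ => s

-- per-column scan of all crate rows, appendleft (deque as List Char, index 0 = left)
def parseStacksA (n : Nat) (rows : List String) : List (List Char) :=
  (List.range n).map (fun column =>
    rows.foldl (fun stack row =>
      match crateAt (1 + column * 4) row with
      | some c => c :: stack          -- appendleft
      | none => stack) [])

-- body of A's move loop: unpack into 6 names, then 'for _ in range(int(amount)): …'
def moveStepA (sts : List (List Char)) (mv : String) : List (List Char) :=
  match PySem.Str.split? mv " " with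
  | some [_, aS, _, oS, _, dS] =>
    match PySem.Int.ofStr? aS with
    | some a => (List.range a.toNat).foldl (fun s _ => popPushS s oS dS) sts
    | none => sts                      -- ValueError; outside Pre_
  | _ => sts                           -- unpacking error; outside Pre_

def movesA (ms : List String) (sts : List (List Char)) : List (List Char) :=
  ms.foldl moveStepA sts

def part1 (crates_and_moves : List String) : String :=
  match PySem.List.index? crates_and_moves "" with
  | none => ""                        -- ValueError; outside Pre_
  | some i =>
    let crates := PySem.List.slice crates_and_moves none (some (i : Int))
    let moves := PySem.List.slice crates_and_moves (some ((i : Int) + 1)) none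
    match crates.getLast? with
    | none => ""                      -- IndexError on crates[-1]; outside Pre_
    | some lastRow =>
      let n := ((PySem.Str.split? lastRow "   ").getD []).length
      let sts := parseStacksA n (PySem.List.slice crates none (some (-1)))
      let sts := movesA moves sts
      String.ofList (sts.filterMap (fun s => s.getLast?))   -- join of stack.pop()

-- ===== PORT B =====
-- single bottom-up pass over the crate rows, appending to plain lists
def parseStacksB (n : Nat) (rowsBottomUp : List String) : List (List Char) :=
  rowsBottomUp.foldl (fun sts row =>
    (List.range n).foldl (fun sts j =>
      match crateAt (1 + 4 * j) row with
      | some c => sts.modify j (· ++ [c])   -- stacks[j].append(row[idx])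
      | none => sts) sts)
    ((List.range n).map (fun _ => []))

-- dst.extend(reversed(src[-amount:])); del src[-amount:]
def batchMove (sts : List (List Char)) (a : Int) (oi di : Nat) : List (List Char) :=
  let src := sts.getD oi []
  let moved := PySem.List.slice src (some (-a)) none
  let rest := PySem.List.slice src none (some (-a))
  (sts.set oi rest).modify di (· ++ moved.reverse)

-- body of B's move loop: parse amount first, stack numbers only when amount > 0,
-- skip when src and dst are the same list object
def moveStepB (sts : List (List Char)) (mv : String) : List (List Char) :=
  let fields := (PySem.Str.split? mv " ").getD []
  match fields[1]? with
  | none => sts                        -- IndexError; outside Pre_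
  | some aS =>
    match PySem.Int.ofStr? aS with
    | none => sts                      -- ValueError; outside Pre_
    | some a =>
      if 0 < a then
        match fields[3]?, fields[5]? with
        | some oS, some dS =>
          match PySem.Int.ofStr? oS, PySem.Int.ofStr? dS with
          | some o, some d =>
            match pyNorm sts.length (o - 1), pyNorm sts.length (d - 1) with
            | some oi, some di => if oi ≠ di then batchMove sts a oi di else sts
            | _, _ => sts              -- IndexError; outside Pre_
          | _, _ => sts                -- ValueError; outside Pre_
        | _, _ => sts                  -- IndexError; outside Pre_
      else sts

def movesB (ms : List String) (sts : List (List Char)) : List (List Char) :=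
  ms.foldl moveStepB sts

def part1_alt (crates_and_moves : List String) : String :=
  match PySem.List.index? crates_and_moves "" with
  | none => ""
  | some sep =>
    let header := PySem.List.slice crates_and_moves none (some (sep : Int))
    match PySem.List.pyGet? header (-1) with
    | none => ""
    | some lastRow =>
      let n := ((PySem.Str.split? lastRow "   ").getD []).length
      -- reversed(header[:-1])
      let sts := parseStacksB n (PySem.List.slice header none (some (-1))).reverse
      let sts := movesB (PySem.List.slice crates_and_moves (some ((sep : Int) + 1)) none) sts
      String.ofList (sts.filterMap (fun s => PySem.List.pyGet? s (-1)))   -- join of s[-1]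

-- ===== PRECONDITION & SPEC =====
-- initial size of stack j (count of guarded crate characters in its column)
def initSize (rows : List String) (j : Nat) : Nat := (rows.filterMap (crateAt (1 + 4 * j))).length

-- static reading of one move line: none = A raises on it (bad field count, unparsable int,
-- stack index out of range); some none = no-op (amount ≤ 0, stack numbers not even read);
-- some (some (a, oi, di)) = move a > 0 crates from stack oi to stack di (indices normalised)
def preMove (n : Nat) (mv : String) : Option (Option (Int × Nat × Nat)) :=
  match PySem.Str.split? mv " " with
  | some [_, aS, _, oS, _, dS] =>
    match PySem.Int.ofStr? aS with
    | none => none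
    | some a =>
      if a ≤ 0 then some none
      else
        match PySem.Int.ofStr? oS, PySem.Int.ofStr? dS with
        | some o, some d =>
          match pyNorm n (o - 1), pyNorm n (d - 1) with
          | some oi, some di => some (some (a, oi, di))
          | _, _ => none
        | _, _ => none
  | _ => none

-- effect of one move on the stack SIZES only; none = a pop would underflow (A raises IndexError)
def sizeStep (n : Nat) (szs : List Nat) (mv : String) : Option (List Nat) :=
  match preMove n mv with
  | none => none
  | some none => some szs
  | some (some (a, oi, di)) =>
    if oi = di then (if 1 ≤ szs.getD oi 0 then some szs else none)
    else if a.toNat ≤ szs.getD oi 0 then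
      some ((szs.set oi (szs.getD oi 0 - a.toNat)).modify di (· + a.toNat))
    else none

def sizesAfter (n : Nat) (ms : List String) (szs : List Nat) : Option (List Nat) :=
  match ms with
  | [] => some szs
  | mv :: ms' =>
    match sizeStep n szs mv with
    | none => none
    | some szs' => sizesAfter n ms' szs'

-- Pre_ excludes exactly the inputs on which A raises: no '' separator, an empty crate section,
-- a move line that is not 6 space-separated fields with an int amount, a positive-amount move
-- whose stack numbers do not parse or fall outside Python's index range, a pop from an empty
-- stack (checked on the stack-size abstraction, which A's moves determine completely), and an
-- empty stack at the final pop.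
def preCheck (cam : List String) : Bool :=
  match PySem.List.index? cam "" with
  | none => false
  | some i =>
    let crates := PySem.List.slice cam none (some (i : Int))
    match crates.getLast? with
    | none => false
    | some lastRow =>
      let n := ((PySem.Str.split? lastRow "   ").getD []).length
      let rows := PySem.List.slice crates none (some (-1))
      match sizesAfter n (PySem.List.slice cam (some ((i : Int) + 1)) none)
          ((List.range n).map (initSize rows)) with
      | some szs => szs.all (fun s => 1 ≤ s)
      | none => false

def Pre_part1 (crates_and_moves : List String) : Prop := preCheck crates_and_moves = true
instance (crates_and_moves : List String) : Decidable (Pre_part1 crates_and_moves) := by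
  unfold Pre_part1; infer_instance

def pvWitness_part1 : List String :=
  ["[C]    ", "[A] [B]", "1   2", "", "move 1 from 1 to 2"]

def Spec_part1 (crates_and_moves : List String) (out : String) : Prop := out = part1_alt crates_and_moves
instance (crates_and_moves : List String) (out : String) : Decidable (Spec_part1 crates_and_moves out) := by unfold Spec_part1; infer_instance

-- ===== CLAIM (what is proved, stated in full; the proofs are below) =====
def Claim_equal_part1 : Prop := ∀ (crates_and_moves : List String), Dom_part1 crates_and_moves → Pre_part1 crates_and_moves → Spec_part1 crates_and_moves (part1 crates_and_moves)

-- ===== LEMMAS AND PROOFS =====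

-- A-side parse: the appendleft loop builds the reversed filterMap of the rows
lemma foldl_consIf (f : String → Option Char) (rows : List String) (acc : List Char) :
    rows.foldl (fun st row => match f row with | some c => c :: st | none => st) acc
      = (rows.filterMap f).reverse ++ acc := by
  induction rows generalizing acc with
  | nil => simp
  | cons r t ih =>
    simp only [List.foldl_cons, List.filterMap_cons]
    cases f r <;> simp [ih]

-- B-side inner fold (one crate row distributed over the n stacks), pointwise
lemma innerB_getElem? (row : String) (n : Nat) (S : List (List Char)) (j : Nat) :
    ((List.range n).foldl (fun sts j' =>
        match crateAt (1 + 4 * j') row with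
        | some c => sts.modify j' (· ++ [c])
        | none => sts) S)[j]?
      = if j < n then S[j]?.map (· ++ (crateAt (1 + 4 * j) row).toList) else S[j]? := by
  induction n with
  | zero => simp
  | succ n ih =>
    rw [List.range_succ, List.foldl_append, List.foldl_cons, List.foldl_nil]
    rcases Nat.lt_trichotomy j n with hjn | rfl | hjn
    · have h1 : j < n + 1 := by omega
      have h2 : n ≠ j := by omega
      cases hcr : crateAt (1 + 4 * n) row
      · rw [ih, if_pos hjn, if_pos h1]
      · rw [List.getElem?_modify, ih, if_pos hjn, if_pos h1]
        cases S[j]? <;> simp [h2]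
    · have h1 : j < j + 1 := by omega
      cases hcr : crateAt (1 + 4 * j) row
      · rw [ih, if_neg (lt_irrefl j), if_pos h1]
        cases S[j]? <;> simp
      · rw [List.getElem?_modify, ih, if_neg (lt_irrefl j), if_pos h1]
        cases S[j]? <;> simp
    · have h1 : ¬ j < n + 1 := by omega
      have h2 : ¬ j < n := by omega
      have h3 : n ≠ j := by omega
      cases hcr : crateAt (1 + 4 * n) row
      · rw [ih, if_neg h2, if_neg h1]
      · rw [List.getElem?_modify, ih, if_neg h2, if_neg h1]
        cases S[j]? <;> simp [h3]

-- B-side outer fold (all rows), pointwise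
lemma outerB_getElem? (rows' : List String) (n : Nat) (S : List (List Char)) (j : Nat) :
    (rows'.foldl (fun sts row =>
        (List.range n).foldl (fun sts j' =>
          match crateAt (1 + 4 * j') row with
          | some c => sts.modify j' (· ++ [c])
          | none => sts) sts) S)[j]?
      = if j < n then S[j]?.map (· ++ rows'.filterMap (crateAt (1 + 4 * j))) else S[j]? := by
  induction rows' generalizing S with
  | nil =>
    rw [List.foldl_nil, List.filterMap_nil]
    split
    · cases S[j]? <;> simp
    · rfl
  | cons r t ih =>
    rw [List.foldl_cons, ih]
    by_cases hj : j < n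
    · rw [if_pos hj, if_pos hj, innerB_getElem?, if_pos hj, List.filterMap_cons]
      cases hcr : crateAt (1 + 4 * j) r <;> cases S[j]? <;> simp
    · rw [if_neg hj, if_neg hj, innerB_getElem?, if_neg hj]

-- the two parses agree
lemma parse_eq (n : Nat) (rows : List String) :
    parseStacksA n rows = parseStacksB n rows.reverse := by
  apply List.ext_getElem?
  intro j
  unfold parseStacksA parseStacksB
  rw [outerB_getElem?]
  by_cases hj : j < n
  · rw [if_pos hj, List.getElem?_map, List.getElem?_range hj]
    simp only [Option.map_some, List.getElem?_map, List.getElem?_range hj]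
    rw [foldl_consIf]
    have h4 : 1 + j * 4 = 1 + 4 * j := by ring
    rw [h4, ← List.filterMap_reverse]
    simp
  · rw [if_neg hj]
    have h1 : n ≤ j := by omega
    simp [h1]

lemma parseStacksB_getElem? (n : Nat) (rows : List String) (j : Nat) (hj : j < n) :
    (parseStacksB n rows)[j]? = some (rows.filterMap (crateAt (1 + 4 * j))) := by
  unfold parseStacksB
  rw [outerB_getElem?, if_pos hj]
  simp [hj]

lemma parseStacksB_length (n : Nat) (rows : List String) :
    (parseStacksB n rows).length = n := by
  have hmain : ∀ (rs : List String) (S : List (List Char)),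
      (rs.foldl (fun sts row =>
        (List.range n).foldl (fun sts j' =>
          match crateAt (1 + 4 * j') row with
          | some c => sts.modify j' (· ++ [c])
          | none => sts) sts) S).length = S.length := by
    intro rs
    induction rs with
    | nil => intro S; rfl
    | cons r t ih =>
      intro S
      rw [List.foldl_cons, ih]
      induction (List.range n) generalizing S with
      | nil => rfl
      | cons j js ihj =>
        rw [List.foldl_cons]
        cases crateAt (1 + 4 * j) r
        · exact ihj S
        · rw [ihj, List.length_modify]
  unfold parseStacksB
  rw [hmain]
  simp

-- sizes of the initial B stacks
lemma map_length_parseStacksB (n : Nat) (rows : List String) :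
    (parseStacksB n rows.reverse).map (fun s => s.length) = (List.range n).map (initSize rows) := by
  apply List.ext_getElem?
  intro j
  rw [List.getElem?_map, List.getElem?_map]
  by_cases hj : j < n
  · rw [parseStacksB_getElem? n rows.reverse j hj, List.getElem?_range hj]
    simp [initSize, List.filterMap_reverse]
  · rw [List.getElem?_eq_none (by rw [parseStacksB_length]; omega),
      List.getElem?_eq_none (by rw [List.length_range]; omega)]
    rfl

-- proof-side one-crate step with the parses resolved to normalised indices
def popPush (s : List (List Char)) (oi di : Nat) : List (List Char) :=
  match (s.getD oi []).getLast? with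
  | some c => (s.set oi (s.getD oi []).dropLast).modify di (· ++ [c])
  | none => s

lemma popPush_length (s : List (List Char)) (oi di : Nat) :
    (popPush s oi di).length = s.length := by
  unfold popPush
  cases (s.getD oi []).getLast? <;> simp [List.length_modify, List.length_set]

lemma iter_popPush_length (st : List (List Char)) (oi di aN : Nat) :
    ((List.range aN).foldl (fun s _ => popPush s oi di) st).length = st.length := by
  induction aN with
  | zero => rfl
  | succ aN ih =>
    rw [List.range_succ, List.foldl_append, List.foldl_cons, List.foldl_nil, popPush_length, ih]

lemma pyNorm_lt {n : Nat} {i : Int} {j : Nat} (h : pyNorm n i = some j) : j < n := by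
  unfold pyNorm at h
  split_ifs at h with h1 h2
  · injection h with h; omega
  · injection h with h; omega

lemma popPushS_eq (s : List (List Char)) (oS dS : String) (o d : Int) (oi di : Nat)
    (ho : PySem.Int.ofStr? oS = some o) (hd : PySem.Int.ofStr? dS = some d)
    (hno : pyNorm s.length (o - 1) = some oi) (hnd : pyNorm s.length (d - 1) = some di) :
    popPushS s oS dS = popPush s oi di := by
  unfold popPushS popPush
  rw [hd, ho]
  dsimp only
  rw [hnd, hno]

lemma iter_popPushS (st : List (List Char)) (oS dS : String) (o d : Int) (oi di : Nat) (aN : Nat)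
    (ho : PySem.Int.ofStr? oS = some o) (hd : PySem.Int.ofStr? dS = some d)
    (hno : pyNorm st.length (o - 1) = some oi) (hnd : pyNorm st.length (d - 1) = some di) :
    (List.range aN).foldl (fun s _ => popPushS s oS dS) st
      = (List.range aN).foldl (fun s _ => popPush s oi di) st := by
  induction aN with
  | zero => rfl
  | succ aN ih =>
    rw [List.range_succ, List.foldl_append, List.foldl_append, ih,
      List.foldl_cons, List.foldl_cons, List.foldl_nil, List.foldl_nil]
    have hlen : ((List.range aN).foldl (fun s _ => popPush s oi di) st).length = st.length :=
      iter_popPush_length st oi di aN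
    exact popPushS_eq _ oS dS o d oi di ho hd (by rw [hlen]; exact hno) (by rw [hlen]; exact hnd)

-- the closed form of one whole move (oi ≠ di): the block leaves oi, arrives reversed on di
def moveClosed (st : List (List Char)) (oi di aN : Nat) : List (List Char) :=
  (st.set oi ((st.getD oi []).take ((st.getD oi []).length - aN))).modify di
    (· ++ ((st.getD oi []).drop ((st.getD oi []).length - aN)).reverse)

lemma moveClosed_length (st : List (List Char)) (oi di aN : Nat) :
    (moveClosed st oi di aN).length = st.length := by
  unfold moveClosed
  rw [List.length_modify, List.length_set]

lemma moveClosed_getD (st : List (List Char)) (oi di aN : Nat) (hoi : oi < st.length)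
    (hdi : di < st.length) (hne : oi ≠ di) (j : Nat) :
    (moveClosed st oi di aN).getD j []
      = if j = oi then (st.getD oi []).take ((st.getD oi []).length - aN)
        else if j = di then st.getD di [] ++ ((st.getD oi []).drop ((st.getD oi []).length - aN)).reverse
        else st.getD j [] := by
  have hLoi : st[oi]? = some (st.getD oi []) := by
    rw [List.getD_eq_getElem?_getD, List.getElem?_eq_getElem hoi]; rfl
  have hLdi : st[di]? = some (st.getD di []) := by
    rw [List.getD_eq_getElem?_getD, List.getElem?_eq_getElem hdi]; rfl
  unfold moveClosed
  rw [List.getD_eq_getElem?_getD]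
  simp only [List.getElem?_modify, List.getElem?_set]
  by_cases hjo : j = oi
  · subst hjo
    simp [Ne.symm hne, hoi]
  · by_cases hjd : j = di
    · have h2 : ¬ di = oi := fun h => hne h.symm
      simp only [hjd, if_neg hne, if_neg h2, hLdi]
      simp
    · have h1 : ¬ oi = j := fun h => hjo h.symm
      have h2 : ¬ di = j := fun h => hjd h.symm
      simp only [if_neg h1, if_neg h2, if_neg hjo, if_neg hjd]
      simp [List.getD_eq_getElem?_getD]

lemma moveClosed_zero (st : List (List Char)) (oi di : Nat) (hoi : oi < st.length) :
    moveClosed st oi di 0 = st := by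
  have hLoi : st[oi]? = some (st.getD oi []) := by
    rw [List.getD_eq_getElem?_getD, List.getElem?_eq_getElem hoi]; rfl
  apply List.ext_getElem?
  intro j
  unfold moveClosed
  simp only [Nat.sub_zero, List.take_length, List.drop_length, List.reverse_nil,
    List.getElem?_modify, List.getElem?_set]
  by_cases hjo : oi = j
  · subst hjo
    rw [if_pos rfl, if_pos hoi, hLoi]
    by_cases hdo : di = oi <;> simp [hdo]
  · rw [if_neg hjo]
    by_cases hdj : di = j
    · subst hdj
      cases st[di]? <;> simp
    · simp [hdj]

lemma iter_popPush (st : List (List Char)) (oi di : Nat) (hoi : oi < st.length)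
    (hdi : di < st.length) (hne : oi ≠ di) (aN : Nat)
    (ha : aN ≤ (st.getD oi []).length) :
    (List.range aN).foldl (fun s _ => popPush s oi di) st = moveClosed st oi di aN := by
  induction aN with
  | zero => simpa using (moveClosed_zero st oi di hoi).symm
  | succ aN ih =>
    have ha' : aN ≤ (st.getD oi []).length := by omega
    rw [List.range_succ, List.foldl_append, List.foldl_cons, List.foldl_nil, ih ha']
    have hsrc : (moveClosed st oi di aN).getD oi []
        = (st.getD oi []).take ((st.getD oi []).length - aN) := by
      rw [moveClosed_getD st oi di aN hoi hdi hne oi, if_pos rfl]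
    have htklen : ((st.getD oi []).take ((st.getD oi []).length - aN)).length
        = (st.getD oi []).length - aN := by
      simp [List.length_take]
    have hidx : (st.getD oi []).length - aN - 1 < (st.getD oi []).length := by omega
    have hlast : ((st.getD oi []).take ((st.getD oi []).length - aN)).getLast?
        = some ((st.getD oi [])[(st.getD oi []).length - aN - 1]) := by
      rw [List.getLast?_eq_getElem?, htklen, List.getElem?_take, if_pos (by omega),
        List.getElem?_eq_getElem hidx]
    have hdl : ((st.getD oi []).take ((st.getD oi []).length - aN)).dropLast
        = (st.getD oi []).take ((st.getD oi []).length - (aN + 1)) := by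
      rw [List.dropLast_eq_take, htklen, List.take_take]
      congr 1
      omega
    have hdrop : (st.getD oi []).drop ((st.getD oi []).length - (aN + 1))
        = (st.getD oi [])[(st.getD oi []).length - aN - 1] :: (st.getD oi []).drop ((st.getD oi []).length - aN) := by
      have he : (st.getD oi []).length - (aN + 1) = (st.getD oi []).length - aN - 1 := by omega
      have he2 : (st.getD oi []).length - aN - 1 + 1 = (st.getD oi []).length - aN := by omega
      rw [he, List.drop_eq_getElem_cons hidx, he2]
    simp only [List.getD_eq_getElem?_getD] at hdrop
    unfold popPush
    rw [hsrc, hlast]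
    dsimp only
    rw [hdl]
    apply List.ext_getElem?
    intro j
    unfold moveClosed
    simp only [List.getElem?_modify, List.getElem?_set, List.length_modify, List.length_set]
    by_cases hjo : oi = j
    · subst hjo
      simp [Ne.symm hne, hoi]
    · by_cases hjd : di = j
      · subst hjd
        simp only [if_neg hjo]
        cases st[di]? <;> simp [hdrop]
      · simp [hjo, hjd]

lemma popPush_self (st : List (List Char)) (oi : Nat) (hoi : oi < st.length)
    (hne : st.getD oi [] ≠ []) : popPush st oi oi = st := by
  unfold popPush
  have hLoi : st[oi]? = some (st.getD oi []) := by
    rw [List.getD_eq_getElem?_getD, List.getElem?_eq_getElem hoi]; rfl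
  rw [List.getLast?_eq_some_getLast hne]
  dsimp only
  apply List.ext_getElem?
  intro j
  simp only [List.getElem?_modify, List.getElem?_set]
  by_cases hj : oi = j
  · subst hj
    simp [hoi, List.dropLast_append_getLast]
  · simp [hj]

lemma iter_popPush_self (st : List (List Char)) (oi : Nat) (hoi : oi < st.length)
    (hne : st.getD oi [] ≠ []) (aN : Nat) :
    (List.range aN).foldl (fun s _ => popPush s oi oi) st = st := by
  induction aN with
  | zero => rfl
  | succ aN ih =>
    rw [List.range_succ, List.foldl_append, ih, List.foldl_cons, List.foldl_nil,
      popPush_self st oi hoi hne]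

lemma batchMove_eq_closed (st : List (List Char)) (a : Int) (oi di : Nat) (hpos : 0 < a) :
    batchMove st a oi di = moveClosed st oi di a.toNat := by
  simp only [batchMove, moveClosed]
  have hk : 0 < a.toNat := by omega
  have ha' : -a = -((a.toNat : Nat) : Int) := by omega
  rw [ha', PySem.List.slice_from_neg_natCast (st.getD oi []) a.toNat hk,
    PySem.List.slice_to_neg_natCast (st.getD oi []) a.toNat hk]

lemma map_length_getD (st : List (List Char)) (j : Nat) (hj : j < st.length) :
    (st.map (fun s => s.length)).getD j 0 = (st.getD j []).length := by
  rw [List.getD_eq_getElem?_getD, List.getD_eq_getElem?_getD, List.getElem?_map,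
    List.getElem?_eq_getElem hj]
  rfl

lemma map_length_moveClosed (st : List (List Char)) (oi di aN : Nat) (hoi : oi < st.length)
    (hdi : di < st.length) (hne : oi ≠ di) (ha : aN ≤ (st.getD oi []).length) :
    (moveClosed st oi di aN).map (fun s => s.length)
      = ((st.map (fun s => s.length)).set oi ((st.map (fun s => s.length)).getD oi 0 - aN)).modify di
          (· + aN) := by
  apply List.ext_getElem?
  intro j
  rw [List.getElem?_map, map_length_getD st oi hoi]
  simp only [List.getElem?_modify, List.getElem?_set, List.getElem?_map, List.length_map]
  by_cases hj : j < st.length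
  · have hmc : (moveClosed st oi di aN)[j]? = some ((moveClosed st oi di aN).getD j []) := by
      rw [List.getD_eq_getElem?_getD, List.getElem?_eq_getElem (by rw [moveClosed_length]; exact hj)]
      rfl
    rw [hmc, moveClosed_getD st oi di aN hoi hdi hne j, List.getElem?_eq_getElem hj]
    have hgd : st.getD j [] = st[j] := by
      rw [List.getD_eq_getElem?_getD, List.getElem?_eq_getElem hj]; rfl
    by_cases hjo : j = oi
    · subst hjo
      have hdj : ¬ di = j := fun h => hne h.symm
      simp only [if_neg hdj, hj, if_true, Option.map_some, Option.map_eq_map,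
        List.length_take]
      congr 1
      omega
    · by_cases hjd : j = di
      · subst hjd
        have hoj : ¬ oi = j := fun h => hjo h.symm
        simp only [if_neg hjo, if_neg hoj, if_true, Option.map_some, Option.map_eq_map, hgd]
        simp only [List.length_append, List.length_reverse, List.length_drop,
          Option.some.injEq]
        rw [← hgd]
        omega
      · have hoj : ¬ oi = j := fun h => hjo h.symm
        have hdj : ¬ di = j := fun h => hjd h.symm
        simp only [if_neg hjo, if_neg hjd, if_neg hoj, if_neg hdj, Option.map_some,
          Option.map_eq_map, hgd]
  · have hoj : ¬ oi = j := by omega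
    have hdj : ¬ di = j := by omega
    rw [List.getElem?_eq_none (by rw [moveClosed_length]; omega),
      List.getElem?_eq_none (le_of_not_gt hj)]
    simp [hoj, hdj]

-- one whole move: A's per-crate loop equals B's guarded block splice, and the size
-- abstraction predicts the new stack lengths
lemma step_eq (n : Nat) (st : List (List Char)) (hlen : st.length = n) (mv : String)
    (L' : List Nat) (hstep : sizeStep n (st.map (fun s => s.length)) mv = some L') :
    moveStepA st mv = moveStepB st mv ∧ (moveStepA st mv).map (fun s => s.length) = L' ∧
      (moveStepA st mv).length = n := by
  unfold sizeStep preMove at hstep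
  unfold moveStepA moveStepB
  cases hsp : PySem.Str.split? mv " " with
  | none => rw [hsp] at hstep; simp at hstep
  | some fields =>
    rw [hsp] at hstep
    rcases fields with _ | ⟨f0, _ | ⟨aS, _ | ⟨f2, _ | ⟨oS, _ | ⟨f4, _ | ⟨dS, _ | ⟨f6, rest⟩⟩⟩⟩⟩⟩⟩ <;>
      try simp at hstep
    simp only [Option.getD_some, List.getElem?_cons_succ, List.getElem?_cons_zero]
    cases ha : PySem.Int.ofStr? aS with
    | none => rw [ha] at hstep; simp at hstep
    | some a =>
      rw [ha] at hstep
      dsimp only at hstep ⊢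
      by_cases haz : a ≤ 0
      · rw [if_pos haz] at hstep
        simp only [Option.some.injEq] at hstep
        have h0 : a.toNat = 0 := by omega
        rw [h0, if_neg (by omega)]
        simp only [List.range_zero, List.foldl_nil]
        exact ⟨trivial, hstep, hlen⟩
      · rw [if_neg haz] at hstep
        have hpos : 0 < a := by omega
        rw [if_pos hpos]
        cases ho : PySem.Int.ofStr? oS with
        | none => rw [ho] at hstep; simp at hstep
        | some o =>
          cases hd : PySem.Int.ofStr? dS with
          | none => rw [ho, hd] at hstep; simp at hstep
          | some d =>
            rw [ho, hd] at hstep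
            dsimp only at hstep ⊢
            cases hno : pyNorm n (o - 1) with
            | none => rw [hno] at hstep; simp at hstep
            | some oi =>
              cases hnd : pyNorm n (d - 1) with
              | none => rw [hno, hnd] at hstep; simp at hstep
              | some di =>
                rw [hno, hnd] at hstep
                dsimp only at hstep
                have hoi : oi < st.length := by rw [hlen]; exact pyNorm_lt hno
                have hdi : di < st.length := by rw [hlen]; exact pyNorm_lt hnd
                have hno' : pyNorm st.length (o - 1) = some oi := by rw [hlen]; exact hno
                have hnd' : pyNorm st.length (d - 1) = some di := by rw [hlen]; exact hnd
                rw [hno', hnd']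
                dsimp only
                rw [iter_popPushS st oS dS o d oi di a.toNat ho hd hno' hnd']
                have hopt : (Option.map (fun s => s.length) st[oi]?).getD 0
                    = (st.getD oi []).length := by
                  rw [List.getElem?_eq_getElem hoi, List.getD_eq_getElem?_getD,
                    List.getElem?_eq_getElem hoi]
                  rfl
                have hopt' : (st.map (fun s => s.length)).getD oi 0 = (st.getD oi []).length :=
                  map_length_getD st oi hoi
                by_cases hod : oi = di
                · subst hod
                  rw [if_pos rfl] at hstep
                  rw [if_neg (by simp)]
                  split_ifs at hstep with hge
                  · simp only [Option.some.injEq] at hstep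
                    rw [hopt] at hge
                    have hne : st.getD oi [] ≠ [] := by
                      intro hnil; rw [hnil] at hge; simp at hge
                    rw [iter_popPush_self st oi hoi hne]
                    exact ⟨rfl, hstep, hlen⟩
                · rw [if_neg hod] at hstep
                  rw [if_pos hod]
                  split_ifs at hstep with hge
                  · simp only [Option.some.injEq] at hstep
                    rw [hopt] at hge
                    have hgeN : a.toNat ≤ (st.getD oi []).length := by omega
                    rw [iter_popPush st oi di hoi hdi hod a.toNat hgeN,
                      batchMove_eq_closed st a oi di hpos]
                    refine ⟨rfl, ?_, by rw [moveClosed_length]; exact hlen⟩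
                    rw [map_length_moveClosed st oi di a.toNat hoi hdi hod hgeN, ← hstep, hopt,
                      hopt']

-- the two move loops agree whenever the size abstraction never underflows
lemma moves_eq (n : Nat) (ms : List String) :
    ∀ st : List (List Char), st.length = n →
      ∀ res, sizesAfter n ms (st.map (fun s => s.length)) = some res →
        movesA ms st = movesB ms st := by
  induction ms with
  | nil => intro st _ res _; rfl
  | cons mv ms ih =>
    intro st hlen res h
    unfold sizesAfter at h
    cases hstep : sizeStep n (st.map (fun s => s.length)) mv with
    | none => rw [hstep] at h; simp at h
    | some L' =>
      rw [hstep] at h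
      obtain ⟨heq, hmap, hlen'⟩ := step_eq n st hlen mv L' hstep
      unfold movesA movesB
      rw [List.foldl_cons, List.foldl_cons, ← heq]
      have := ih (moveStepA st mv) hlen' res (by rw [hmap]; exact h)
      unfold movesA movesB at this
      exact this

-- ===== VERDICT (by name: the statement is the Claim_ definition above) =====
theorem part1_spec : Claim_equal_part1 := by
  unfold Claim_equal_part1
  intro cam _ hP
  unfold Spec_part1 part1 part1_alt
  unfold Pre_part1 preCheck at hP
  cases hidx : PySem.List.index? cam "" with
  | none => rw [hidx] at hP
  | some i =>
    rw [hidx] at hP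
    dsimp only at hP
    simp only [PySem.List.pyGet?_neg_one]
    cases hlast : (PySem.List.slice cam none (some (i : Int))).getLast? with
    | none => rw [hlast] at hP
    | some lastRow =>
      rw [hlast] at hP
      dsimp only at hP ⊢
      set n := ((PySem.Str.split? lastRow "   ").getD []).length with hn
      set rows := PySem.List.slice (PySem.List.slice cam none (some (i : Int))) none (some (-1)) with hrows
      set moves := PySem.List.slice cam (some ((i : Int) + 1)) none with hmoves
      cases hsz : sizesAfter n moves ((List.range n).map (initSize rows)) with
      | none => rw [hsz] at hP; simp at hP
      | some szs =>
        have hstacks : movesA moves (parseStacksA n rows)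
            = movesB moves (parseStacksB n rows.reverse) := by
          rw [parse_eq n rows]
          exact moves_eq n moves (parseStacksB n rows.reverse) (parseStacksB_length n rows.reverse)
            szs (by rw [map_length_parseStacksB]; exact hsz)
        rw [parse_eq n rows] at hstacks ⊢
        rw [hstacks]
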